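-- pv_equiv track=rewrite | github.com/arielfayol37/PageRank | pagerank.py | generate_parent_nodes
-- ===== SOURCE A (Python) =====
-- def generate_parent_nodes(corpus):
--     """
--     Goes through the corpus and creates a dictionary with pages as keys,
--     and the pages that link to those pages(keys) as values.
--     """
--     parent_nodes = {}
--     for page in corpus:
--         linked_pages = corpus[page]
--         if linked_pages:
--             for linked_page in linked_pages:
--                 parents_set = parent_nodes.get(linked_page, set())
--                 parents_set.add(page)
--                 parent_nodes[linked_page] = parents_set
--         else:
--             # if the page does not link to any page, we act as though
--             # it links to all the pages. (including itself)
--             for page2 in corpus: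
--                 parents_set = parent_nodes.get(page2, set())
--                 parents_set.add(page)
--                 parent_nodes[page2] = parents_set
--
--     return parent_nodes
-- ===== SOURCE B (Python) =====
-- def generate_parent_nodes(corpus):
--     # Target-centric "gather": treat an empty link list as linking to every
--     # page, compute the ordered key set of all targets, then build each
--     # entry independently by scanning the pages that target it.
--     pages = list(corpus)
--     keys = dict.fromkeys(t for p in pages for t in (corpus[p] or pages))
--     return {t: {p for p in pages if t in (corpus[p] or pages)} for t in keys}
-- ===== Notes on version B (the rewrite author's own statement) =====
-- stated objective: alternative
-- what changed: A scatters: it iterates pages and incrementally mutates a parent dict via get/add/assign inside an if/else pair of nested loops; B gathers: it normalises each empty link list to the full page list, computes the ordered target key set once with dict.fromkeys, and then builds every parent set independently by a membership scan over the pages (a transpose computed target-by-target instead of edge-by-edge).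
import Mathlib
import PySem

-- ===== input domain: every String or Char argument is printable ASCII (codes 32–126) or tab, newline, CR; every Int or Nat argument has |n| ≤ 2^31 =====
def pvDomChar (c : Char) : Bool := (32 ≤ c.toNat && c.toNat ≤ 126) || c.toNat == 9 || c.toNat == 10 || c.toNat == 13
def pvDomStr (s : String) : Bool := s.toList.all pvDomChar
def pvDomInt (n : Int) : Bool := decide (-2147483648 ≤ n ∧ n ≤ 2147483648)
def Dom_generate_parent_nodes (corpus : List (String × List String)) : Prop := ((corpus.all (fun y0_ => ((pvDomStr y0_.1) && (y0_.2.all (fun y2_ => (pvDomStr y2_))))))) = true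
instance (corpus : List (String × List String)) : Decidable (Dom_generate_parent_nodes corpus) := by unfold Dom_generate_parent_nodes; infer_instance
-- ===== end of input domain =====

-- B replaces A's incremental scatter (mutating a parent dict page by page) by a gather:
-- the ordered key set is computed once, then each parent set is built independently by a
-- membership scan over the pages. Objective: alternative algorithm; no speed claim.

-- ===== PORT A =====
def generate_parent_nodes (corpus : List (String × List String)) : List (String × List String) :=
  let d : PySem.Dict String (List String) := PySem.Dict.mk corpus
  let parent_nodes : PySem.Dict String (PySem.Set String) :=
    corpus.foldl (fun parent_nodes pl =>
      let page := pl.1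
      let linked_pages := (PySem.Dict.get? d page).getD []   -- corpus[page]; page is a key of corpus
      if linked_pages ≠ [] then
        linked_pages.foldl (fun pn linked_page =>
          let parents_set := PySem.Dict.getD pn linked_page PySem.Set.empty
          let parents_set := PySem.Set.add parents_set page
          PySem.Dict.insert pn linked_page parents_set) parent_nodes
      else
        corpus.foldl (fun pn pl2 =>
          let parents_set := PySem.Dict.getD pn pl2.1 PySem.Set.empty
          let parents_set := PySem.Set.add parents_set page
          PySem.Dict.insert pn pl2.1 parents_set) parent_nodes)
      PySem.Dict.empty
  parent_nodes.items

-- ===== PORT B =====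
def generate_parent_nodes_alt (corpus : List (String × List String)) : List (String × List String) :=
  let d : PySem.Dict String (List String) := PySem.Dict.mk corpus
  let pages := d.keys                                        -- pages = list(corpus)
  -- keys = dict.fromkeys(t for p in pages for t in (corpus[p] or pages))
  let keys := PySem.List.dedup (pages.flatMap (fun p =>
    let ls := (PySem.Dict.get? d p).getD []                  -- corpus[p]; p is a key of corpus
    if ls ≠ [] then ls else pages))
  -- {t: {p for p in pages if t in (corpus[p] or pages)} for t in keys}
  keys.map (fun t => (t, PySem.Set.ofList (pages.filter (fun p =>
    let ls := (PySem.Dict.get? d p).getD []                  -- corpus[p]; p is a key of corpus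
    decide (t ∈ (if ls ≠ [] then ls else pages))))))

-- ===== PRECONDITION & SPEC =====
-- The Python argument is a dict, which cannot carry duplicate keys; Pre_ requires the
-- association list to have pairwise-distinct keys (it excludes no input the Python A accepts).
def Pre_generate_parent_nodes (corpus : List (String × List String)) : Prop :=
  (corpus.map Prod.fst).Nodup
instance (corpus : List (String × List String)) : Decidable (Pre_generate_parent_nodes corpus) := by unfold Pre_generate_parent_nodes; infer_instance
def pvWitness_generate_parent_nodes : (List (String × List String)) := [("a", ["b", "c"]), ("b", [])]

def Spec_generate_parent_nodes (corpus : List (String × List String)) (out : List (String × List String)) : Prop := out = generate_parent_nodes_alt corpus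
instance (corpus : List (String × List String)) (out : List (String × List String)) : Decidable (Spec_generate_parent_nodes corpus out) := by unfold Spec_generate_parent_nodes; infer_instance

-- ===== CLAIM (what is proved, stated in full; the proofs are below) =====
def Claim_equal_generate_parent_nodes : Prop := ∀ (corpus : List (String × List String)), Dom_generate_parent_nodes corpus → Pre_generate_parent_nodes corpus → Spec_generate_parent_nodes corpus (generate_parent_nodes corpus)

-- ===== LEMMAS AND PROOFS =====

-- A's per-(target, source) update "parents_set = pn.get(t, set()); parents_set.add(p); pn[t] = parents_set" is a Dict.modify
def pvScatterStep (pn : PySem.Dict String (PySem.Set String)) (e : String × String) : PySem.Dict String (PySem.Set String) :=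
  PySem.Dict.modify pn e.1 PySem.Set.empty (fun s => PySem.Set.add s e.2)

-- the flattened (target, source) edge stream of A's nested loops
def pvEdges (corpus : List (String × List String)) : List (String × String) :=
  corpus.flatMap (fun pl =>
    (if pl.2 ≠ [] then pl.2 else corpus.map Prod.fst).map (fun t => (t, pl.1)))

theorem pv_getD_scatter (es : List (String × String)) (d : PySem.Dict String (PySem.Set String)) (k : String) :
    PySem.Dict.getD (es.foldl pvScatterStep d) k PySem.Set.empty
    = PySem.Set.update (PySem.Dict.getD d k PySem.Set.empty)
        ((es.filter (fun e => e.1 == k)).map Prod.snd) := by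
  induction es generalizing d with
  | nil => simp [PySem.Set.update]
  | cons e es ih =>
    simp only [List.foldl_cons, ih, List.filter_cons]
    by_cases h : e.1 = k
    · simp [pvScatterStep, h, PySem.Set.update_cons]
    · simp [pvScatterStep, PySem.Dict.getD_modify, h, Ne.symm h]

theorem pv_keys_scatter (es : List (String × String)) :
    (es.foldl pvScatterStep PySem.Dict.empty).keys = PySem.Set.ofList (es.map Prod.fst) := by
  have := PySem.Dict.keys_foldl_modify_key (l := es) (key := Prod.fst)
    (d0 := PySem.Set.empty) (f := fun _ x => (fun s => PySem.Set.add s x.2))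
    (d := PySem.Dict.empty)
  simpa [pvScatterStep, PySem.Set.update_nil_left] using this

theorem pv_nodup_keys_scatter (es : List (String × String)) :
    (es.foldl pvScatterStep PySem.Dict.empty).keys.Nodup := by
  exact PySem.Dict.nodup_keys_foldl_modify_key es Prod.fst PySem.Set.empty
    (fun _ x => (fun s => PySem.Set.add s x.2)) PySem.Dict.empty PySem.Dict.nodup_keys_empty

theorem pv_items_scatter (es : List (String × String)) :
    (es.foldl pvScatterStep PySem.Dict.empty).items =
      (PySem.Set.ofList (es.map Prod.fst)).map (fun k =>
        (k, PySem.Set.ofList ((es.filter (fun e => e.1 == k)).map Prod.snd))) := by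
  rw [PySem.Dict.items_eq_map_keys _ (pv_nodup_keys_scatter es) PySem.Set.empty, pv_keys_scatter]
  refine List.map_congr_left ?_
  intro k _
  rw [pv_getD_scatter]
  simp [PySem.Set.empty, PySem.Set.update_nil_left]

theorem pv_A_eq_scatter (corpus : List (String × List String))
    (hnd : (corpus.map Prod.fst).Nodup) :
    generate_parent_nodes corpus = ((pvEdges corpus).foldl pvScatterStep PySem.Dict.empty).items := by
  unfold generate_parent_nodes pvEdges
  rw [List.foldl_flatMap]
  refine congrArg PySem.Dict.items ?_
  apply PySem.List.foldl_congr_mem'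
  intro pl hpl pn
  simp only [PySem.Dict.get?_of_mem_items (d := PySem.Dict.mk corpus) (k := pl.1) (v := pl.2) hpl hnd, Option.getD_some]
  by_cases h2 : pl.2 = []
  · simp [h2, pvScatterStep, PySem.Dict.modify, List.foldl_map]
  · simp [h2, pvScatterStep, PySem.Dict.modify, List.foldl_map]

theorem pv_update_const {α β : Type} [BEq α] [LawfulBEq α] (l : List β) (s : PySem.Set α) (x : α) :
    PySem.Set.update s (l.map (fun _ => x)) = if l = [] then s else PySem.Set.add s x := by
  induction l generalizing s with
  | nil => simp [PySem.Set.update]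
  | cons b l ih =>
    simp only [List.map_cons, PySem.Set.update_cons, ih]
    by_cases h : l = []
    · simp [h]
    · simp [h]

theorem pv_sources_gen (tg : (String × List String) → List String)
    (l : List (String × List String)) (k : String) (s : PySem.Set String) :
    PySem.Set.update s (((l.flatMap (fun pl => (tg pl).map (fun t => (t, pl.1)))).filter
        (fun e => e.1 == k)).map Prod.snd)
    = PySem.Set.update s ((l.filter (fun pl => decide (k ∈ tg pl))).map Prod.fst) := by
  induction l generalizing s with
  | nil => rfl
  | cons pl l ih =>
    simp only [List.flatMap_cons, List.filter_append, List.map_append,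
      PySem.Set.update_append, ih, List.filter_cons]
    have hblock : ((((tg pl).map (fun t => (t, pl.1))).filter (fun e => e.1 == k)).map Prod.snd)
        = ((tg pl).filter (fun t => t == k)).map (fun _ => pl.1) := by
      simp [List.filter_map, Function.comp_def, List.map_map]
    rw [hblock, pv_update_const]
    by_cases hk : k ∈ tg pl
    · have : (tg pl).filter (fun t => t == k) ≠ [] := by
        rw [Ne, List.filter_eq_nil_iff]
        intro h
        exact h k hk (by simp)
      simp [this, hk, PySem.Set.update_cons]
    · have : (tg pl).filter (fun t => t == k) = [] := by
        rw [List.filter_eq_nil_iff]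
        intro a ha hak
        exact hk ((beq_iff_eq.mp hak) ▸ ha)
      simp [this, hk]

-- per-target source lists: A's edge-stream form and B's page-scan form build the same set
theorem pv_sources (corpus : List (String × List String)) (k : String) (s : PySem.Set String) :
    PySem.Set.update s (((pvEdges corpus).filter (fun e => e.1 == k)).map Prod.snd)
    = PySem.Set.update s ((corpus.filter (fun pl =>
        decide (k ∈ (if pl.2 ≠ [] then pl.2 else corpus.map Prod.fst)))).map Prod.fst) := by
  unfold pvEdges
  exact pv_sources_gen (fun pl => if pl.2 ≠ [] then pl.2 else corpus.map Prod.fst) corpus k s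

theorem generate_parent_nodes_eq (corpus : List (String × List String))
    (hnd : (corpus.map Prod.fst).Nodup) :
    generate_parent_nodes corpus = generate_parent_nodes_alt corpus := by
  rw [pv_A_eq_scatter corpus hnd, pv_items_scatter]
  unfold generate_parent_nodes_alt
  simp only [PySem.Dict.keys, PySem.List.dedup_eq_ofList]
  have hstream : (List.flatMap (fun p =>
        if (PySem.Dict.get? (PySem.Dict.mk corpus) p).getD [] ≠ []
        then (PySem.Dict.get? (PySem.Dict.mk corpus) p).getD []
        else corpus.map (fun x => x.1)) (corpus.map (fun x => x.1)))
      = (pvEdges corpus).map Prod.fst := by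
    rw [List.flatMap_map]
    have h1 : (pvEdges corpus).map Prod.fst
        = corpus.flatMap (fun pl => if pl.2 ≠ [] then pl.2 else corpus.map Prod.fst) := by
      simp [pvEdges, List.map_flatMap, List.map_map, Function.comp_def]
    rw [h1]
    apply List.flatMap_congr
    intro pl hpl
    simp only [PySem.Dict.get?_of_mem_items (d := PySem.Dict.mk corpus) (k := pl.1) (v := pl.2) hpl hnd,
      Option.getD_some]
  rw [hstream]
  refine List.map_congr_left ?_
  intro k _
  refine congrArg (fun x => (k, x)) ?_
  have hscan : (List.filter (fun p =>
        decide (k ∈ (if (PySem.Dict.get? (PySem.Dict.mk corpus) p).getD [] ≠ []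
                     then (PySem.Dict.get? (PySem.Dict.mk corpus) p).getD []
                     else corpus.map (fun x => x.1)))) (corpus.map (fun x => x.1)))
      = ((corpus.filter (fun pl =>
          decide (k ∈ (if pl.2 ≠ [] then pl.2 else corpus.map Prod.fst)))).map Prod.fst) := by
    rw [List.filter_map]
    refine congrArg (List.map Prod.fst) ?_
    apply List.filter_congr
    intro pl hpl
    simp only [Function.comp_apply,
      PySem.Dict.get?_of_mem_items (d := PySem.Dict.mk corpus) (k := pl.1) (v := pl.2) hpl hnd,
      Option.getD_some]
  rw [hscan]
  have := pv_sources corpus k PySem.Set.empty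
  simpa [PySem.Set.empty, PySem.Set.update_nil_left] using this

-- ===== VERDICT (by name: the statement is the Claim_ definition above) =====
theorem generate_parent_nodes_spec : Claim_equal_generate_parent_nodes := by
  intro corpus _ hpre
  exact (generate_parent_nodes_eq corpus hpre).symm ▸ rfl
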